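-- pv_equiv track=rewrite | github.com/whatotter/pwnhyve | core/utils.py | ppANSI
-- ===== SOURCE A (Python) =====
-- ansiReset = "\033[0m"
--
-- def ppANSI(string, ansi) -> str:
--     """
--     append ansi code to words wrapped in square brackets
--     """
--     words = string.split(" ")
--     pretty = []
--
--     for word in words:
--         if word.startswith("[") and word.endswith("]"):
--             pretty.append(ansi + word + ansiReset)
--         else:
--             pretty.append(word)
--
--     string = " ".join(pretty)
--
--     return string
-- ===== SOURCE B (Python) =====
-- ansiReset = "\033[0m"
--
-- def _decorate(word, ansi):
--     if word and word[0] == "[" and word[-1] == "]":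
--         return ansi + word + ansiReset
--     return word
--
-- def ppANSI(string, ansi) -> str:
--     """
--     append ansi code to words wrapped in square brackets
--     (single left-to-right character scan; no split/join of a word list)
--     """
--     out = []
--     cur = ""
--     for ch in string:
--         if ch == " ":
--             out.append(_decorate(cur, ansi))
--             out.append(" ")
--             cur = ""
--         else:
--             cur = cur + ch
--     out.append(_decorate(cur, ansi))
--     return "".join(out)
-- ===== Notes on version B (the rewrite author's own statement) =====
-- stated objective: alternative
-- what changed: replaces split(" ")/word-loop/" ".join with a single left-to-right character scan that flushes and decorates the current word at each space and at the end, never materialising a word list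
import Mathlib
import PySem

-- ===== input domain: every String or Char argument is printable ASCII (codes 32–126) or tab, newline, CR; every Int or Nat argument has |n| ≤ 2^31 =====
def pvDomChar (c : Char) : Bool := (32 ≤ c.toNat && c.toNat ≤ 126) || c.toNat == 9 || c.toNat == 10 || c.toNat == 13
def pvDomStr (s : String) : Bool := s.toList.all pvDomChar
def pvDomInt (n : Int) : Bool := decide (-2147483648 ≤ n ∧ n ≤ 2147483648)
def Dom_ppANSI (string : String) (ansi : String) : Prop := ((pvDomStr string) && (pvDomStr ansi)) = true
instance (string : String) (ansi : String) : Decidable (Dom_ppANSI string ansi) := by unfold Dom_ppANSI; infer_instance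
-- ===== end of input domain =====

-- B replaces A's split/word-loop/join with a single character scan that flushes the
-- current word at each space (objective: alternative decomposition, same cost).

def pvAnsiReset : List Char := ['\x1b', '[', '0', 'm']

-- ===== PORT A =====
-- words = string.split(" "); append (ansi + word + ansiReset) or word; " ".join(pretty)
def ppANSI (string : String) (ansi : String) : String :=
  String.mk (PySem.Chars.join [' ']
    ((PySem.Chars.splitOn string.toList [' ']).foldl
      (fun acc word =>
        if PySem.Chars.startswith word ['['] && PySem.Chars.endswith word [']'] then
          acc ++ [ansi.toList ++ word ++ pvAnsiReset]
        else
          acc ++ [word]) []))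

-- ===== PORT B =====
-- if word and word[0] == "[" and word[-1] == "]": ansi + word + ansiReset else word
def pvDecorate (word : List Char) (ansi : List Char) : List Char :=
  if word ≠ [] ∧ word.head? = some '[' ∧ word.getLast? = some ']' then
    ansi ++ word ++ pvAnsiReset
  else
    word

-- the for-loop of Source B: cur accumulates the current word, out the emitted pieces
def pvScan (ansi : List Char) (cur : List Char) : List Char → List Char
  | [] => pvDecorate cur ansi
  | c :: rest =>
      if c = ' ' then pvDecorate cur ansi ++ ' ' :: pvScan ansi [] rest
      else pvScan ansi (cur ++ [c]) rest

def ppANSI_alt (string : String) (ansi : String) : String :=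
  String.mk (pvScan ansi.toList [] string.toList)

-- ===== PRECONDITION & SPEC =====
def Spec_ppANSI (string : String) (ansi : String) (out : String) : Prop := out = ppANSI_alt string ansi
instance (string : String) (ansi : String) (out : String) : Decidable (Spec_ppANSI string ansi out) := by unfold Spec_ppANSI; infer_instance

-- ===== CLAIM (what is proved, stated in full; the proofs are below) =====
def Claim_equal_ppANSI : Prop := ∀ (string : String) (ansi : String), Dom_ppANSI string ansi → Spec_ppANSI string ansi (ppANSI string ansi)

-- ===== LEMMAS AND PROOFS =====

-- reference single-char splitter with the exact shape of splitOn.go on sep = [' ']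
def pvSplitAux : List Char → List Char → List (List Char)
  | [], cur => [cur.reverse]
  | c :: rest, cur =>
      if c = ' ' then cur.reverse :: pvSplitAux rest []
      else pvSplitAux rest (c :: cur)

theorem pvSplitAux_ne_nil (l cur : List Char) : pvSplitAux l cur ≠ [] := by
  induction l generalizing cur with
  | nil => simp [pvSplitAux]
  | cons c rest ih =>
      simp only [pvSplitAux]
      split
      · simp
      · exact ih _

theorem splitOn_go_eq (fuel : Nat) (l cur : List Char) (acc : List (List Char))
    (h : l.length ≤ fuel) :
    PySem.Chars.splitOn.go [' '] fuel l cur acc =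
      acc.reverse ++ pvSplitAux l cur := by
  induction fuel generalizing l cur acc with
  | zero =>
      have hl : l = [] := List.eq_nil_of_length_eq_zero (Nat.le_zero.mp h)
      subst hl
      simp [PySem.Chars.splitOn.go, pvSplitAux]
  | succ n ih =>
      cases l with
      | nil => simp [PySem.Chars.splitOn.go, pvSplitAux]
      | cons c rest =>
          simp only [PySem.Chars.splitOn.go, pvSplitAux]
          by_cases hc : c = ' '
          · subst hc
            have hpre : List.isPrefixOf [' '] (' ' :: rest) = true := by
              simp [List.isPrefixOf]
            simp only [hpre, List.length_cons] at *
            have := ih rest [] (cur.reverse :: acc) (Nat.le_of_succ_le_succ h)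
            simpa using this
          · have hpre : List.isPrefixOf [' '] (c :: rest) = false := by
              simp [List.isPrefixOf]
              exact fun hh => hc hh.symm
            simp only [hpre, if_neg hc, Bool.false_eq_true, if_false]
            have := ih rest (c :: cur) acc (by simpa using Nat.le_of_succ_le_succ h)
            simpa using this

theorem splitOn_eq (s : List Char) :
    PySem.Chars.splitOn s [' '] = pvSplitAux s [] := by
  have := splitOn_go_eq (s.length + 1) s [] [] (by omega)
  simpa [PySem.Chars.splitOn] using this

-- A's branch test equals B's word test
theorem decorate_eq (w ansi : List Char) :
    (if PySem.Chars.startswith w ['['] && PySem.Chars.endswith w [']'] then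
      ansi ++ w ++ pvAnsiReset else w) = pvDecorate w ansi := by
  unfold pvDecorate
  have h1 : PySem.Chars.startswith w ['['] = true ↔ w.head? = some '[' := by
    rw [PySem.Chars.startswith_iff]
    cases w with
    | nil => simp
    | cons c cs =>
        constructor
        · intro h
          rcases h with ⟨t, ht⟩
          cases ht
          rfl
        · intro h
          simp only [List.head?_cons, Option.some.injEq] at h
          subst h
          exact ⟨cs, rfl⟩
  have h2 : PySem.Chars.endswith w [']'] = true ↔ w.getLast? = some ']' := by
    rw [PySem.Chars.endswith_iff]
    constructor
    · intro h
      rcases h with ⟨t, ht⟩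
      subst ht
      simp
    · intro h
      cases hw : w.getLast? with
      | none => simp [hw] at h
      | some c =>
          rw [hw] at h
          cases h
          rcases List.getLast?_eq_some_iff.mp hw with ⟨t, ht⟩
          exact ⟨t, ht.symm⟩
  by_cases hs : PySem.Chars.startswith w ['['] = true
  · by_cases he : PySem.Chars.endswith w [']'] = true
    · have hne : w ≠ [] := by
        intro hw; subst hw; simp [PySem.Chars.startswith] at hs
      rw [if_pos (by simp [hs, he]), if_pos ⟨hne, h1.mp hs, h2.mp he⟩]
    · rw [if_neg (by simp [he]), if_neg (by intro h; exact he (h2.mpr h.2.2))]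
  · rw [if_neg (by simp [hs]), if_neg (by intro h; exact hs (h1.mpr h.2.1))]

theorem foldl_branch_map (P : List Char → Bool) (f : List Char → List Char)
    (l : List (List Char)) (init : List (List Char)) :
    l.foldl (fun acc w => if P w then acc ++ [f w] else acc ++ [w]) init =
      init ++ l.map (fun w => if P w then f w else w) := by
  induction l generalizing init with
  | nil => simp
  | cons x xs ih =>
      simp only [List.foldl_cons, List.map_cons, ih]
      split <;> simp

-- the scan equals "join of decorated split pieces"
theorem pvScan_eq (ansi : List Char) (cs cur : List Char) :
    pvScan ansi cur cs =
      PySem.Chars.join [' '] ((pvSplitAux cs cur.reverse).map (fun w => pvDecorate w ansi)) := by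
  induction cs generalizing cur with
  | nil => simp [pvScan, pvSplitAux, PySem.Chars.join, List.intercalate]
  | cons c rest ih =>
      simp only [pvScan, pvSplitAux]
      by_cases hc : c = ' '
      · subst hc
        rw [if_pos rfl, if_pos rfl]
        obtain ⟨y, ys, hys⟩ : ∃ y ys, pvSplitAux rest [] = y :: ys := by
          cases h : pvSplitAux rest [] with
          | nil => exact absurd h (pvSplitAux_ne_nil rest [])
          | cons y ys => exact ⟨y, ys, rfl⟩
        have := ih []
        simp only [List.reverse_nil] at this
        rw [this, hys]
        simp [PySem.Chars.join, List.intercalate]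
      · rw [if_neg hc, if_neg hc]
        have := ih (cur ++ [c])
        simpa using this

-- ===== VERDICT (by name: the statement is the Claim_ definition above) =====
theorem ppANSI_spec : Claim_equal_ppANSI := by
  intro string ansi _
  unfold Spec_ppANSI ppANSI ppANSI_alt
  rw [splitOn_eq,
    foldl_branch_map (fun w => PySem.Chars.startswith w ['['] && PySem.Chars.endswith w [']'])
      (fun w => ansi.toList ++ w ++ pvAnsiReset)]
  rw [pvScan_eq]
  simp only [List.nil_append, List.reverse_nil]
  congr 1
  congr 1
  apply List.map_congr_left
  intro w _
  exact decorate_eq w ansi.toList
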